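-- pv_equiv track=rewrite | github.com/cashmoneycolors/AutonomousZenithOptimizer | python_modules/electricity_cost_manager.py | _convert_to_time_ranges
-- ===== SOURCE A (Python) =====
-- from typing import Dict, Optional, List
--
-- def _convert_to_time_ranges(hours: List[int]) -> List[str]:
--     """Konvertiere Stunden-Liste zu Zeit-Ranges (z.B. '22:00-06:00')"""
--     if not hours:
--         return []
--
--     hours = sorted(hours)
--     ranges = []
--     start = hours[0]
--     end = hours[0]
--
--     for i in range(1, len(hours)):
--         if hours[i] == end + 1:
--             end = hours[i]
--         else:
--             ranges.append(f"{start:02d}:00-{(end+1)%24:02d}:00")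
--             start = hours[i]
--             end = hours[i]
--
--     ranges.append(f"{start:02d}:00-{(end+1)%24:02d}:00")
--     return ranges
-- ===== SOURCE B (Python) =====
-- from itertools import groupby
-- from typing import List
--
-- def _convert_to_time_ranges(hours: List[int]) -> List[str]:
--     """Konvertiere Stunden-Liste zu Zeit-Ranges (z.B. '22:00-06:00')"""
--     out = []
--     for _, grp in groupby(enumerate(sorted(hours)), key=lambda iv: iv[1] - iv[0]):
--         run = [v for _, v in grp]
--         out.append(f"{run[0]:02d}:00-{(run[-1] + 1) % 24:02d}:00")
--     return out
-- ===== Notes on version B (the rewrite author's own statement) =====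
-- stated objective: idiomatic
-- what changed: Replaces A's manual start/end merge state machine over the sorted list with the standard idiom sort + enumerate + itertools.groupby keyed on value-minus-index, formatting each group from its first and last element.
import Mathlib
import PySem

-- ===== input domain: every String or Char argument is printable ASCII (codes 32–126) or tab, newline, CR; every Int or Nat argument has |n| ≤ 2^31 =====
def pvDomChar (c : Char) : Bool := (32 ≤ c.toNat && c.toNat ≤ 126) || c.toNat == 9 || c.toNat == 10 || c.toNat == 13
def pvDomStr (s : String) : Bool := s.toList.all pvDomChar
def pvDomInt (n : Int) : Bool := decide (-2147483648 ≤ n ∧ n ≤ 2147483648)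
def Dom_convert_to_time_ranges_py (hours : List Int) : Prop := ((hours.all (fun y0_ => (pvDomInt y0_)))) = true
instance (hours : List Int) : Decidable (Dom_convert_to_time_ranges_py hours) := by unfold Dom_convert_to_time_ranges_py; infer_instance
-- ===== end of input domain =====

-- B replaces A's manual start/end merge state machine by sort + enumerate + groupby
-- on the key value-minus-index (objective: idiomatic; same O(n log n) cost).


-- ===== PORT A =====

-- f"{x:02d}" (= str(x).zfill(2)) — exact, including negatives
def pvPad2 (x : Int) : String := PySem.Str.zfill (PySem.Int.toStr x) 2

-- f"{start:02d}:00-{(end+1)%24:02d}:00"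
def pvFmtRange (s e : Int) : String :=
  PySem.Str.join "" [pvPad2 s, ":00-", pvPad2 (PySem.Int.mod (e + 1) 24), ":00"]

def convert_to_time_ranges_py (hours : List Int) : List String :=
  if hours = [] then []
  else
    -- hours = sorted(hours)
    match PySem.List.sorted hours (fun x => x) false with
    | [] => []  -- unreachable: sorted of a nonempty list is nonempty
    | h :: t =>
      -- for i in range(1, len(hours)): state = (ranges, start, end)
      let st := t.foldl (fun (st : List String × Int × Int) x =>
        if x = st.2.2 + 1 then (st.1, st.2.1, x)
        else (st.1 ++ [pvFmtRange st.2.1 st.2.2], x, x)) ([], h, h)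
      st.1 ++ [pvFmtRange st.2.1 st.2.2]

-- ===== PORT B =====

-- itertools.groupby: list of the (nonempty) maximal consecutive groups of equal key
def pvGroupBy (key : Int × Int → Int) : List (Int × Int) → List (List (Int × Int))
  | [] => []
  | x :: xs =>
    match pvGroupBy key xs with
    | [] => [[x]]
    | [] :: gs => [x] :: [] :: gs  -- unreachable: groups are nonempty
    | (y :: g) :: gs => if key x = key y then (x :: y :: g) :: gs else [x] :: (y :: g) :: gs

-- run[-1] of a group seen as (head, tail)
def pvLastVal (p : Int × Int) (g : List (Int × Int)) : Int := (g.getLastD p).2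

def convert_to_time_ranges_py_alt (hours : List Int) : List String :=
  -- sorted(hours), enumerated, grouped by the key value - index
  (pvGroupBy (fun iv => iv.2 - iv.1) (PySem.List.enumerate (PySem.List.sorted hours (fun x => x) false) 0)).map (fun run =>
    match run with
    | [] => ""  -- unreachable: groupby groups are nonempty
    | p :: g => pvFmtRange p.2 (pvLastVal p g))

-- ===== PRECONDITION & SPEC =====
def Spec_convert_to_time_ranges_py (hours : List Int) (out : List String) : Prop := out = convert_to_time_ranges_py_alt hours
instance (hours : List Int) (out : List String) : Decidable (Spec_convert_to_time_ranges_py hours out) := by unfold Spec_convert_to_time_ranges_py; infer_instance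

-- ===== CLAIM (what is proved, stated in full; the proofs are below) =====
def Claim_equal_convert_to_time_ranges_py : Prop := ∀ (hours : List Int), Dom_convert_to_time_ranges_py hours → Spec_convert_to_time_ranges_py hours (convert_to_time_ranges_py hours)

-- ===== LEMMAS AND PROOFS =====

-- reference form of A's loop: s = start of current run, e = previous element
def pvRecA (s e : Int) : List Int → List String
  | [] => [pvFmtRange s e]
  | x :: xs => if x = e + 1 then pvRecA s x xs else pvFmtRange s e :: pvRecA x x xs

theorem pvFoldA (t : List Int) : ∀ (acc : List String) (s e : Int),
    (let st := t.foldl (fun (st : List String × Int × Int) x =>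
        if x = st.2.2 + 1 then (st.1, st.2.1, x)
        else (st.1 ++ [pvFmtRange st.2.1 st.2.2], x, x)) (acc, s, e)
     st.1 ++ [pvFmtRange st.2.1 st.2.2]) = acc ++ pvRecA s e t := by
  induction t with
  | nil => intro acc s e; simp [pvRecA]
  | cons x xs ih =>
    intro acc s e
    simp only [List.foldl_cons, pvRecA]
    by_cases h : x = e + 1
    · simp [h, ih]
    · simp [h, ih, List.append_assoc]

-- first group of groupby on a nonempty list starts with the first element
theorem pvGroupBy_head (key : Int × Int → Int) (l : List (Int × Int)) (y : Int × Int) :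
    ∃ g gs, pvGroupBy key (y :: l) = (y :: g) :: gs := by
  simp only [pvGroupBy]
  rcases pvGroupBy key l with _ | ⟨_ | ⟨z, g⟩, gs⟩
  · exact ⟨[], [], rfl⟩
  · exact ⟨[], [] :: gs, rfl⟩
  · by_cases h : key y = key z
    · exact ⟨z :: g, gs, by simp [h]⟩
    · exact ⟨[], (z :: g) :: gs, by simp [h]⟩

-- B's rendering of groups, with the first group's start value made explicit
def pvMapFmt (s : Int) : List (List (Int × Int)) → List String
  | [] => []
  | [] :: gs => "" :: gs.map (fun run => match run with
      | [] => "" | p :: g => pvFmtRange p.2 (pvLastVal p g))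
  | (p :: g) :: gs => pvFmtRange s (pvLastVal p g) :: gs.map (fun run => match run with
      | [] => "" | p :: g => pvFmtRange p.2 (pvLastVal p g))

theorem pvGroupBy_cons (key : Int × Int → Int) (x : Int × Int) (l : List (Int × Int)) :
    pvGroupBy key (x :: l) =
      (match pvGroupBy key l with
       | [] => [[x]]
       | [] :: gs => [x] :: [] :: gs
       | (y :: g) :: gs => if key x = key y then (x :: y :: g) :: gs else [x] :: (y :: g) :: gs) := rfl

theorem pvGrpB (t : List Int) : ∀ (n s v : Int),
    pvMapFmt s (pvGroupBy (fun iv => iv.2 - iv.1) (PySem.List.enumerate (v :: t) n))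
      = pvRecA s v t := by
  induction t with
  | nil =>
    intro n s v
    simp [PySem.List.enumerate_cons, PySem.List.enumerate_nil, pvGroupBy, pvMapFmt,
      pvLastVal, pvRecA]
  | cons x xs ih =>
    intro n s v
    rw [PySem.List.enumerate_cons, PySem.List.enumerate_cons]
    obtain ⟨g, gs, hG⟩ := pvGroupBy_head (fun iv => iv.2 - iv.1)
      (PySem.List.enumerate xs (n + 1 + 1)) (n + 1, x)
    have hrest : PySem.List.enumerate (x :: xs) (n + 1) = (n + 1, x) :: PySem.List.enumerate xs (n + 1 + 1) :=
      PySem.List.enumerate_cons ..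
    rw [pvGroupBy_cons, hG]
    have hIH := ih (n + 1) s x
    have hIH' := ih (n + 1) x x
    rw [hrest, hG] at hIH hIH'
    simp only [pvRecA]
    by_cases h : x = v + 1
    · rw [if_pos h]
      have hk : ((fun (iv : Int × Int) => iv.2 - iv.1) (n, v)) = ((fun (iv : Int × Int) => iv.2 - iv.1) (n + 1, x)) := by
        simp; omega
      rw [if_pos hk]
      rw [← hIH]
      rcases g with _ | ⟨p, gg⟩ <;> simp [pvMapFmt, pvLastVal, List.getLast?_eq_some_getLast]
    · rw [if_neg h]
      have hk : ¬ ((fun (iv : Int × Int) => iv.2 - iv.1) (n, v)) = ((fun (iv : Int × Int) => iv.2 - iv.1) (n + 1, x)) := by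
        simp; omega
      rw [if_neg hk]
      rw [← hIH']
      simp [pvMapFmt, pvLastVal]

-- B written through pvMapFmt (the first group starts with the sorted head)
theorem pvAltEq (hours : List Int) (h t') (hs : PySem.List.sorted hours (fun x => x) false = h :: t') :
    convert_to_time_ranges_py_alt hours
      = pvMapFmt h (pvGroupBy (fun iv => iv.2 - iv.1) (PySem.List.enumerate (h :: t') 0)) := by
  unfold convert_to_time_ranges_py_alt
  rw [hs]
  rw [PySem.List.enumerate_cons]
  obtain ⟨g, gs, hG⟩ := pvGroupBy_head (fun iv => iv.2 - iv.1)
    (PySem.List.enumerate t' (0 + 1)) ((0 : Int), h)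
  rw [hG]
  simp [pvMapFmt, pvLastVal]

-- ===== VERDICT (by name: the statement is the Claim_ definition above) =====
theorem convert_to_time_ranges_py_spec : Claim_equal_convert_to_time_ranges_py := by
  intro hours _
  unfold Spec_convert_to_time_ranges_py
  by_cases hnil : hours = []
  · subst hnil
    rfl
  · rcases hs : PySem.List.sorted hours (fun x => x) false with _ | ⟨h, t⟩
    · exact absurd ((PySem.List.sorted_eq_nil_iff hours (fun x => x) false).mp hs) hnil
    · rw [pvAltEq hours h t hs, pvGrpB]
      unfold convert_to_time_ranges_py
      rw [if_neg hnil, hs]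
      simpa using pvFoldA t [] h h
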